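-- pv_equiv track=rewrite | github.com/The-DeepMatrix/ML-Repository | ml_server.py | get_broad_class
-- ===== SOURCE A (Python) =====
-- def get_broad_class(prediction):
--     class_mapping = {
--         'Bacterial Spot':['Corn_(maize)___Cercospora_leaf_spot Gray_leaf_spot','Peach___Bacterial_spot','Pepper,_bell___Bacterial_spot','Tomato___Bacterial_spot','Tomato___Septoria_leaf_spot','Tomato___Target_Spot'],
--         'Black Measles':['Grape___Esca_(Black_Measles)'],
--         'Black Rot':['Apple___Black_rot','Grape___Black_rot',],
--         'Blight':['Corn_(maize)___Northern_Leaf_Blight','Potato___Early_blight','Potato___Late_blight','Grape___Leaf_blight_(Isariopsis_Leaf_Spot)','Tomato___Early_blight','Tomato___Late_blight'],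
--         'Citrus Greening':['Orange___Haunglongbing_(Citrus_greening)',],
--         'Curl Virus':['Tomato___Tomato_Yellow_Leaf_Curl_Virus'],
--         'Healthy':['Apple___healthy','Blueberry___healthy','Cherry_(including_sour)___healthy','Corn_(maize)___healthy','Grape___healthy','Peach___healthy','Potato___healthy','Raspberry___healthy','Soybean___healthy','Strawberry___healthy','Tomato___healthy','Pepper,_bell___healthy'],
--         'Leaf Scorch':['Strawberry___Leaf_scorch'],
--         'Mold':['Tomato___Leaf_Mold'],
--         'Mosaic Virus':['Tomato___Tomato_mosaic_virus'],
--         'Powdery Mildew':['Cherry_(including_sour)___Powdery_mildew','Squash___Powdery_mildew'],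
--         'Rust':['Apple___Cedar_apple_rust','Corn_(maize)___Common_rust_'],
--         'Scab':['Apple___Apple_scab'],
--         'Spider Mite':['Tomato___Spider_mites Two-spotted_spider_mite']
--     }
--
--     for key, val in class_mapping.items():
--         if prediction in val:
--             return key
-- ===== SOURCE B (Python) =====
-- # Prebuilt flat label->class lookup table; one O(1) dict hit per call.
-- _LABEL_TO_CLASS = {
--     'Corn_(maize)___Cercospora_leaf_spot Gray_leaf_spot': 'Bacterial Spot',
--     'Peach___Bacterial_spot': 'Bacterial Spot',
--     'Pepper,_bell___Bacterial_spot': 'Bacterial Spot',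
--     'Tomato___Bacterial_spot': 'Bacterial Spot',
--     'Tomato___Septoria_leaf_spot': 'Bacterial Spot',
--     'Tomato___Target_Spot': 'Bacterial Spot',
--     'Grape___Esca_(Black_Measles)': 'Black Measles',
--     'Apple___Black_rot': 'Black Rot',
--     'Grape___Black_rot': 'Black Rot',
--     'Corn_(maize)___Northern_Leaf_Blight': 'Blight',
--     'Potato___Early_blight': 'Blight',
--     'Potato___Late_blight': 'Blight',
--     'Grape___Leaf_blight_(Isariopsis_Leaf_Spot)': 'Blight',
--     'Tomato___Early_blight': 'Blight',
--     'Tomato___Late_blight': 'Blight',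
--     'Orange___Haunglongbing_(Citrus_greening)': 'Citrus Greening',
--     'Tomato___Tomato_Yellow_Leaf_Curl_Virus': 'Curl Virus',
--     'Apple___healthy': 'Healthy',
--     'Blueberry___healthy': 'Healthy',
--     'Cherry_(including_sour)___healthy': 'Healthy',
--     'Corn_(maize)___healthy': 'Healthy',
--     'Grape___healthy': 'Healthy',
--     'Peach___healthy': 'Healthy',
--     'Potato___healthy': 'Healthy',
--     'Raspberry___healthy': 'Healthy',
--     'Soybean___healthy': 'Healthy',
--     'Strawberry___healthy': 'Healthy',
--     'Tomato___healthy': 'Healthy',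
--     'Pepper,_bell___healthy': 'Healthy',
--     'Strawberry___Leaf_scorch': 'Leaf Scorch',
--     'Tomato___Leaf_Mold': 'Mold',
--     'Tomato___Tomato_mosaic_virus': 'Mosaic Virus',
--     'Cherry_(including_sour)___Powdery_mildew': 'Powdery Mildew',
--     'Squash___Powdery_mildew': 'Powdery Mildew',
--     'Apple___Cedar_apple_rust': 'Rust',
--     'Corn_(maize)___Common_rust_': 'Rust',
--     'Apple___Apple_scab': 'Scab',
--     'Tomato___Spider_mites Two-spotted_spider_mite': 'Spider Mite',
-- }
--
--
-- def get_broad_class(prediction):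
--     return _LABEL_TO_CLASS.get(prediction)
-- ===== Notes on version B (the rewrite author's own statement) =====
-- stated objective: idiomatic
-- what changed: B replaces A's per-call construction of the nested class->labels dict and its loop of list-membership scans by a module-level flat label->class dict built once, answered with a single _LABEL_TO_CLASS.get(prediction) hash lookup.
import Mathlib
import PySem

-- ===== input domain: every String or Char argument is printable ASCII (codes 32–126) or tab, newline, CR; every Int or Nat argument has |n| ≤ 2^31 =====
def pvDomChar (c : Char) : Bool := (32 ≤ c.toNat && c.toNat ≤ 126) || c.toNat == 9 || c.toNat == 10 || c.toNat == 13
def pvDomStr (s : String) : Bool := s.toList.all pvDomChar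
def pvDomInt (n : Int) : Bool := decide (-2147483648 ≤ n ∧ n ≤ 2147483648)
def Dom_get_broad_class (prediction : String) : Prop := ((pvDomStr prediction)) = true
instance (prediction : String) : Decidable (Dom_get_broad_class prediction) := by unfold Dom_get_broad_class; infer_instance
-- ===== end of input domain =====

-- B replaces A's per-call nested table + list-membership scan by a prebuilt flat
-- label→class dictionary answered with a single lookup (objective: idiomatic; same result).

-- ===== PORT A =====
-- A's literal class_mapping dict (insertion-ordered pair list)
def pvClassMapping : List (String × List String) := [
  ("Bacterial Spot", ["Corn_(maize)___Cercospora_leaf_spot Gray_leaf_spot","Peach___Bacterial_spot","Pepper,_bell___Bacterial_spot","Tomato___Bacterial_spot","Tomato___Septoria_leaf_spot","Tomato___Target_Spot"]),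
  ("Black Measles", ["Grape___Esca_(Black_Measles)"]),
  ("Black Rot", ["Apple___Black_rot","Grape___Black_rot"]),
  ("Blight", ["Corn_(maize)___Northern_Leaf_Blight","Potato___Early_blight","Potato___Late_blight","Grape___Leaf_blight_(Isariopsis_Leaf_Spot)","Tomato___Early_blight","Tomato___Late_blight"]),
  ("Citrus Greening", ["Orange___Haunglongbing_(Citrus_greening)"]),
  ("Curl Virus", ["Tomato___Tomato_Yellow_Leaf_Curl_Virus"]),
  ("Healthy", ["Apple___healthy","Blueberry___healthy","Cherry_(including_sour)___healthy","Corn_(maize)___healthy","Grape___healthy","Peach___healthy","Potato___healthy","Raspberry___healthy","Soybean___healthy","Strawberry___healthy","Tomato___healthy","Pepper,_bell___healthy"]),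
  ("Leaf Scorch", ["Strawberry___Leaf_scorch"]),
  ("Mold", ["Tomato___Leaf_Mold"]),
  ("Mosaic Virus", ["Tomato___Tomato_mosaic_virus"]),
  ("Powdery Mildew", ["Cherry_(including_sour)___Powdery_mildew","Squash___Powdery_mildew"]),
  ("Rust", ["Apple___Cedar_apple_rust","Corn_(maize)___Common_rust_"]),
  ("Scab", ["Apple___Apple_scab"]),
  ("Spider Mite", ["Tomato___Spider_mites Two-spotted_spider_mite"])]

-- A's for-loop over class_mapping.items(): first class whose label list contains prediction
def pvFindBroad (prediction : String) : List (String × List String) → Option String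
  | [] => none
  | (key, val) :: rest =>
      if val.contains prediction then some key else pvFindBroad prediction rest

def get_broad_class (prediction : String) : Option String :=
  pvFindBroad prediction pvClassMapping

-- ===== PORT B =====
-- Source B's module-level flat literal dict _LABEL_TO_CLASS, built once
def pvLabelToClass : List (String × String) := [
  ("Corn_(maize)___Cercospora_leaf_spot Gray_leaf_spot", "Bacterial Spot"),
  ("Peach___Bacterial_spot", "Bacterial Spot"),
  ("Pepper,_bell___Bacterial_spot", "Bacterial Spot"),
  ("Tomato___Bacterial_spot", "Bacterial Spot"),
  ("Tomato___Septoria_leaf_spot", "Bacterial Spot"),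
  ("Tomato___Target_Spot", "Bacterial Spot"),
  ("Grape___Esca_(Black_Measles)", "Black Measles"),
  ("Apple___Black_rot", "Black Rot"),
  ("Grape___Black_rot", "Black Rot"),
  ("Corn_(maize)___Northern_Leaf_Blight", "Blight"),
  ("Potato___Early_blight", "Blight"),
  ("Potato___Late_blight", "Blight"),
  ("Grape___Leaf_blight_(Isariopsis_Leaf_Spot)", "Blight"),
  ("Tomato___Early_blight", "Blight"),
  ("Tomato___Late_blight", "Blight"),
  ("Orange___Haunglongbing_(Citrus_greening)", "Citrus Greening"),
  ("Tomato___Tomato_Yellow_Leaf_Curl_Virus", "Curl Virus"),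
  ("Apple___healthy", "Healthy"),
  ("Blueberry___healthy", "Healthy"),
  ("Cherry_(including_sour)___healthy", "Healthy"),
  ("Corn_(maize)___healthy", "Healthy"),
  ("Grape___healthy", "Healthy"),
  ("Peach___healthy", "Healthy"),
  ("Potato___healthy", "Healthy"),
  ("Raspberry___healthy", "Healthy"),
  ("Soybean___healthy", "Healthy"),
  ("Strawberry___healthy", "Healthy"),
  ("Tomato___healthy", "Healthy"),
  ("Pepper,_bell___healthy", "Healthy"),
  ("Strawberry___Leaf_scorch", "Leaf Scorch"),
  ("Tomato___Leaf_Mold", "Mold"),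
  ("Tomato___Tomato_mosaic_virus", "Mosaic Virus"),
  ("Cherry_(including_sour)___Powdery_mildew", "Powdery Mildew"),
  ("Squash___Powdery_mildew", "Powdery Mildew"),
  ("Apple___Cedar_apple_rust", "Rust"),
  ("Corn_(maize)___Common_rust_", "Rust"),
  ("Apple___Apple_scab", "Scab"),
  ("Tomato___Spider_mites Two-spotted_spider_mite", "Spider Mite")]

-- Source B: return _LABEL_TO_CLASS.get(prediction)
def get_broad_class_alt (prediction : String) : Option String :=
  (PySem.Dict.ofList pvLabelToClass).get? prediction

-- ===== PRECONDITION & SPEC =====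
def Spec_get_broad_class (prediction : String) (out : Option String) : Prop := out = get_broad_class_alt prediction
instance (prediction : String) (out : Option String) : Decidable (Spec_get_broad_class prediction out) := by unfold Spec_get_broad_class; infer_instance

-- ===== CLAIM (what is proved, stated in full; the proofs are below) =====
def Claim_equal_get_broad_class : Prop := ∀ (prediction : String), Dom_get_broad_class prediction → Spec_get_broad_class prediction (get_broad_class prediction)

-- ===== LEMMAS AND PROOFS =====

-- B's flat table is exactly A's nested table inverted, in the same order
lemma pvTable_inv :
    pvLabelToClass = pvClassMapping.flatMap (fun kv => kv.2.map (fun label => (label, kv.1))) := by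
  decide

-- all labels are distinct, so the dict-literal build inserts only fresh keys
lemma pvLabels_nodup : ((pvLabelToClass).map Prod.fst).Nodup := by decide

-- with distinct keys, Dict.ofList keeps the pair list as its items
lemma pvOfList_flat :
    PySem.Dict.ofList pvLabelToClass = PySem.Dict.mk pvLabelToClass := by
  apply PySem.Dict.ext
  have h := PySem.Dict.items_foldl_insert_fresh pvLabelToClass
    Prod.fst Prod.snd (PySem.Dict.empty)
    (fun a _ => PySem.Dict.contains_empty a.1) pvLabels_nodup
  simpa [PySem.Dict.ofList, PySem.Dict.update, PySem.Dict.empty] using h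

-- first-match lookup in one inverted chunk ++ rest is A's membership test on that chunk
lemma pvLookup_chunk (vs : List String) (k p : String) (rest : List (String × String)) :
    (PySem.Dict.mk (vs.map (fun label => (label, k)) ++ rest)).get? p
      = if vs.contains p then some k else (PySem.Dict.mk rest).get? p := by
  induction vs with
  | nil => simp
  | cons v vs ih =>
      by_cases hv : v = p
      · subst hv; simp [PySem.Dict.get?_mk_cons]
      · simp [PySem.Dict.get?_mk_cons, ih, hv, Ne.symm hv]

-- first-match lookup in the flattened inversion of a nested table is A's loop
lemma pvLookup_flat (m : List (String × List String)) (p : String) :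
    (PySem.Dict.mk (m.flatMap (fun kv => kv.2.map (fun label => (label, kv.1))))).get? p
      = pvFindBroad p m := by
  induction m with
  | nil => simp [pvFindBroad, PySem.Dict.get?]
  | cons kv rest ih =>
      obtain ⟨k, vs⟩ := kv
      simp only [List.flatMap_cons] at *
      rw [pvLookup_chunk, ih]
      simp [pvFindBroad]

-- ===== VERDICT (by name: the statement is the Claim_ definition above) =====
theorem get_broad_class_spec : Claim_equal_get_broad_class := by
  intro p _
  unfold Spec_get_broad_class get_broad_class get_broad_class_alt
  rw [pvOfList_flat, pvTable_inv, pvLookup_flat]
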